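-- pv_equiv track=rewrite | github.com/infinity4471/Dynamic-Min-Sum-Set-Cover | mtf_optimal.py | solve
-- ===== SOURCE A (Python) =====
-- def mtf( permutation, element ):
--     for index in range( len( permutation ) ):
--         if permutation[ index ] == element:
--             return [element] + permutation[ :index ] + permutation[ (index+1): ], index + 1
--     return None
--
-- def solve( permutation, sets ):
--     if sets == []:
--         return 0, [ permutation ]
--     ans = 1234567890
--     curset = sets[ 0 ]
--     final_permutations = []
--     for elem in curset:
--         newpermutation, cost = mtf( permutation, elem )
--         rec_cost, rec_permutations = solve( newpermutation, sets[ 1 : ] )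
--         if rec_cost + cost < ans:
--             final_permutations = rec_permutations
--             ans = rec_cost + cost
--     return ans, [ permutation ] + final_permutations
-- ===== SOURCE B (Python) =====
-- def solve(permutation, sets):
--     # Breadth-first: fold over the sets building every (cost, perm, trace)
--     # candidate, then one strict-< first-win scan picks the answer.
--     candidates = [(0, permutation, [])]
--     for s in sets:
--         nxt = []
--         for cost, perm, trace in candidates:
--             for e in s:
--                 i = perm.index(e)
--                 moved = [e] + perm[:i] + perm[i + 1:]
--                 nxt.append((cost + i + 1, moved, trace + [moved]))
--         candidates = nxt
--     ans = 1234567890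
--     final = []
--     for cost, _perm, trace in candidates:
--         if cost < ans:
--             ans = cost
--             final = trace
--     return ans, [permutation] + final
-- ===== Notes on version B (the rewrite author's own statement) =====
-- stated objective: alternative
-- what changed: Replaces A's depth-first recursion with per-level min selection by a breadth-first fold that materialises every (cost, trace) candidate across the sets and then a single strict-< first-win scan picking the answer.
import Mathlib
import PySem

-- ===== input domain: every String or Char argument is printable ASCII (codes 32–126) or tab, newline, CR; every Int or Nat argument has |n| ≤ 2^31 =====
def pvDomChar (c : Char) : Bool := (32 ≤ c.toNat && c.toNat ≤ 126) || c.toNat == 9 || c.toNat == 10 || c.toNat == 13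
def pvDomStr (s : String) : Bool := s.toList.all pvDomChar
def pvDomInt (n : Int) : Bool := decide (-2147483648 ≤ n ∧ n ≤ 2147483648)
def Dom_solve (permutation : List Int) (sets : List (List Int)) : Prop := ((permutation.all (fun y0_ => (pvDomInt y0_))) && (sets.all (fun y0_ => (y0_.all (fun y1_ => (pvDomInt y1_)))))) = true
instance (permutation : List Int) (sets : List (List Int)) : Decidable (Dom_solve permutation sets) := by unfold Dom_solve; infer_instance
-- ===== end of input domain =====

-- B replaces A's depth-first recursion (per-level strict-< min) by a breadth-first fold
-- materialising all candidate traces followed by one first-win min scan; objective: alternative.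

-- ===== PORT A =====
-- Python mtf: for index in range(len(permutation)): if permutation[index]==element: return …; return None
def mtfA_go (permutation : List Int) (element : Int) : List Nat → Option (List Int × Int)
  | [] => none
  | index :: rest =>
    -- permutation[index]: index drawn from range(len), always in range; .getD 0 is never exercised
    if (PySem.List.pyGet? permutation (index : Int)).getD 0 = element then
      some (element :: (PySem.List.slice permutation none (some (index : Int)) ++
                        PySem.List.slice permutation (some ((index : Int) + 1)) none),
            (index : Int) + 1)
    else mtfA_go permutation element rest

def mtf (permutation : List Int) (element : Int) : Option (List Int × Int) :=
  mtfA_go permutation element (List.range permutation.length)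

mutual
-- the for-loop of solve, carrying (ans, final_permutations)
def solveA_loop (permutation : List Int) (rest : List (List Int)) :
    List Int → Int → List (List Int) → Int × List (List Int)
  | [], ans, fin => (ans, fin)
  | elem :: es, ans, fin =>
    match mtf permutation elem with
    | none => solveA_loop permutation rest es ans fin   -- Python raises TypeError here (outside Pre_solve)
    | some (newpermutation, cost) =>
      let rec_ := solve newpermutation rest
      if rec_.1 + cost < ans then solveA_loop permutation rest es (rec_.1 + cost) rec_.2
      else solveA_loop permutation rest es ans fin
  termination_by cur ans fin => (2 * rest.length + 2, cur.length)

def solve (permutation : List Int) (sets : List (List Int)) : Int × List (List Int) :=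
  match sets with
  | [] => (0, [permutation])
  | curset :: rest =>
    let r := solveA_loop permutation rest curset 1234567890 []
    (r.1, permutation :: r.2)
  termination_by (2 * sets.length + 1, 0)
end

-- ===== PORT B =====
-- Source B: breadth-first candidate fold, then a strict-< first-win scan
def solve_alt (permutation : List Int) (sets : List (List Int)) : Int × List (List Int) :=
  let candidates := sets.foldl
    (fun (candidates : List (Int × List Int × List (List Int))) s =>
      candidates.foldl (fun nxt c =>
        s.foldl (fun nxt2 e =>
          -- perm.index(e): some inside Pre_solve; Python raises ValueError otherwise (.getD 0 unexercised)
          let i := (PySem.List.index? c.2.1 e).getD 0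
          let moved := e :: (PySem.List.slice c.2.1 none (some (i : Int)) ++
                             PySem.List.slice c.2.1 (some ((i : Int) + 1)) none)
          nxt2 ++ [(c.1 + (i : Int) + 1, moved, c.2.2 ++ [moved])]) nxt) [])
    [((0 : Int), permutation, ([] : List (List Int)))]
  let r := candidates.foldl
    (fun (st : Int × List (List Int)) c => if c.1 < st.1 then (c.1, c.2.2) else st)
    ((1234567890 : Int), ([] : List (List Int)))
  (r.1, permutation :: r.2)

-- ===== PRECONDITION & SPEC =====
-- Pre_solve excludes exactly the inputs where A raises TypeError: some element of a set
-- reached by the search (i.e. before the first empty set) is absent from the permutation.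
def Pre_solve (permutation : List Int) (sets : List (List Int)) : Prop :=
  ∀ s ∈ sets.takeWhile (fun s => !s.isEmpty), ∀ x ∈ s, x ∈ permutation
instance (permutation : List Int) (sets : List (List Int)) : Decidable (Pre_solve permutation sets) := by
  unfold Pre_solve; infer_instance

def pvWitness_solve : List Int × List (List Int) := ([1, 2, 3], [[2, 3], [1, 3]])

def Spec_solve (permutation : List Int) (sets : List (List Int)) (out : Int × List (List Int)) : Prop := out = solve_alt permutation sets
instance (permutation : List Int) (sets : List (List Int)) (out : Int × List (List Int)) : Decidable (Spec_solve permutation sets out) := by unfold Spec_solve; infer_instance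

-- ===== CLAIM (what is proved, stated in full; the proofs are below) =====
def Claim_equal_solve : Prop := ∀ (permutation : List Int) (sets : List (List Int)), Dom_solve permutation sets → Pre_solve permutation sets → Spec_solve permutation sets (solve permutation sets)

-- ===== LEMMAS AND PROOFS =====

-- proof-side vocabulary ---------------------------------------------------
def mvStep (p : List Int) (e : Int) (j : Nat) : List Int := e :: (p.take j ++ p.drop (j + 1))
def expandT (p : List Int) : List (List Int) → List (Int × List Int × List (List Int))
  | [] => [((0 : Int), p, ([] : List (List Int)))]
  | s :: rest => s.flatMap (fun e =>
      let j := (PySem.List.index? p e).getD 0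
      let np := mvStep p e j
      (expandT np rest).map (fun d => (((j : Nat) : Int) + 1 + d.1, d.2.1, np :: d.2.2)))
def cmpStep (st : Int × List (List Int)) (c : Int × List Int × List (List Int)) :
    Int × List (List Int) := if c.1 < st.1 then (c.1, c.2.2) else st

def bmk (c : Int × List Int × List (List Int)) (e : Int) : Int × List Int × List (List Int) :=
  let j := (PySem.List.index? c.2.1 e).getD 0
  (c.1 + (j : Int) + 1, mvStep c.2.1 e j, c.2.2 ++ [mvStep c.2.1 e j])

theorem stepB_eq (cands : List (Int × List Int × List (List Int))) (s : List Int) :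
    cands.foldl (fun nxt c =>
        s.foldl (fun nxt2 e =>
          nxt2 ++ [(c.1 + ((PySem.List.index? c.2.1 e).getD 0 : Int) + 1,
            e :: (PySem.List.slice c.2.1 none (some ((PySem.List.index? c.2.1 e).getD 0 : Int)) ++
                  PySem.List.slice c.2.1 (some (((PySem.List.index? c.2.1 e).getD 0 : Int) + 1)) none),
            c.2.2 ++ [e :: (PySem.List.slice c.2.1 none (some ((PySem.List.index? c.2.1 e).getD 0 : Int)) ++
                  PySem.List.slice c.2.1 (some (((PySem.List.index? c.2.1 e).getD 0 : Int) + 1)) none)])]) nxt) [] =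
      cands.flatMap (fun c => s.map (bmk c)) := by
  have hmk : ∀ (c : Int × List Int × List (List Int)) (e : Int),
      ((c.1 + ((PySem.List.index? c.2.1 e).getD 0 : Int) + 1,
        e :: (PySem.List.slice c.2.1 none (some ((PySem.List.index? c.2.1 e).getD 0 : Int)) ++
              PySem.List.slice c.2.1 (some (((PySem.List.index? c.2.1 e).getD 0 : Int) + 1)) none),
        c.2.2 ++ [e :: (PySem.List.slice c.2.1 none (some ((PySem.List.index? c.2.1 e).getD 0 : Int)) ++
              PySem.List.slice c.2.1 (some (((PySem.List.index? c.2.1 e).getD 0 : Int) + 1)) none)])) = bmk c e := by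
    intro c e
    simp only [bmk, mvStep]
    have h1 : PySem.List.slice c.2.1 none (some (((PySem.List.index? c.2.1 e).getD 0 : Nat) : Int)) =
        c.2.1.take ((PySem.List.index? c.2.1 e).getD 0) := PySem.List.slice_to_natCast _ _
    have h2 : PySem.List.slice c.2.1 (some ((((PySem.List.index? c.2.1 e).getD 0 : Nat) : Int) + 1)) none =
        c.2.1.drop ((PySem.List.index? c.2.1 e).getD 0 + 1) := by
      rw [show ((((PySem.List.index? c.2.1 e).getD 0 : Nat) : Int) + 1) =
            (((PySem.List.index? c.2.1 e).getD 0 + 1 : Nat) : Int) by push_cast; ring]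
      exact PySem.List.slice_from_natCast _ _
    rw [h1, h2]
  simp only [hmk, PySem.List.foldl_append_singleton_eq_map, PySem.List.foldl_append_eq_flatMap,
    List.nil_append]
theorem foldl_stepB_eq (sets : List (List Int)) :
    ∀ (C : List (Int × List Int × List (List Int))),
    sets.foldl (fun cands s => cands.flatMap (fun c => s.map (bmk c))) C =
      C.flatMap (fun c => (expandT c.2.1 sets).map (fun d => (c.1 + d.1, d.2.1, c.2.2 ++ d.2.2))) := by
  induction sets with
  | nil =>
    intro C
    simp [expandT]
  | cons s rest ih =>
    intro C
    simp only [List.foldl_cons]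
    rw [ih]
    rw [List.flatMap_assoc]
    apply List.flatMap_congr
    intro c _
    rw [List.flatMap_map]
    show s.flatMap (fun e => (expandT (bmk c e).2.1 rest).map
        (fun d => ((bmk c e).1 + d.1, d.2.1, (bmk c e).2.2 ++ d.2.2))) = _
    simp only [expandT, List.map_flatMap]
    apply List.flatMap_congr
    intro e _
    simp only [bmk, List.map_map]
    apply List.map_congr_left
    intro d _
    refine Prod.ext ?_ (Prod.ext rfl ?_)
    · simp; ring
    · simp
theorem solve_alt_eq_expand' (p : List Int) (sets : List (List Int)) :
    solve_alt p sets =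
      (let r := (expandT p sets).foldl cmpStep ((1234567890 : Int), []); (r.1, p :: r.2)) := by
  simp only [solve_alt]
  have hstep : (fun (cands : List (Int × List Int × List (List Int))) (s : List Int) =>
      cands.foldl (fun nxt c =>
        s.foldl (fun nxt2 e =>
          nxt2 ++ [(c.1 + ((PySem.List.index? c.2.1 e).getD 0 : Int) + 1,
            e :: (PySem.List.slice c.2.1 none (some ((PySem.List.index? c.2.1 e).getD 0 : Int)) ++
                  PySem.List.slice c.2.1 (some (((PySem.List.index? c.2.1 e).getD 0 : Int) + 1)) none),
            c.2.2 ++ [e :: (PySem.List.slice c.2.1 none (some ((PySem.List.index? c.2.1 e).getD 0 : Int)) ++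
                  PySem.List.slice c.2.1 (some (((PySem.List.index? c.2.1 e).getD 0 : Int) + 1)) none)])]) nxt) []) =
      (fun cands s => cands.flatMap (fun c => s.map (bmk c))) := by
    funext cands s; exact stepB_eq cands s
  rw [hstep]
  rw [foldl_stepB_eq]
  simp only [List.flatMap_cons, List.flatMap_nil, List.append_nil, List.nil_append, zero_add]
  have : (expandT p sets).map (fun d => (d.1, d.2.1, d.2.2)) = expandT p sets := by
    simp
  rw [this]
  rfl
def bestC : List (Int × List Int × List (List Int)) → Option (Int × List (List Int))
  | [] => none
  | c :: r => match bestC r with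
    | none => some (c.1, c.2.2)
    | some m => if m.1 < c.1 then some m else some (c.1, c.2.2)

theorem foldl_cmp_best (l : List (Int × List Int × List (List Int))) :
    ∀ (ans : Int) (fin : List (List Int)),
    l.foldl cmpStep (ans, fin) =
      (match bestC l with
       | none => (ans, fin)
       | some m => if m.1 < ans then m else (ans, fin)) := by
  induction l with
  | nil => intro ans fin; simp [bestC]
  | cons c r ih =>
    intro ans fin
    simp only [List.foldl_cons, bestC, cmpStep]
    rcases h : bestC r with _ | m <;> rw [ih] <;> simp only [h] <;>
      split_ifs <;> dsimp only <;> split_ifs <;> first | rfl | (exfalso; omega)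

theorem best_shift (c : Int) (np : List Int) (l : List (Int × List Int × List (List Int))) :
    bestC (l.map (fun d => (c + d.1, d.2.1, np :: d.2.2))) =
      (bestC l).map (fun m => (c + m.1, np :: m.2)) := by
  induction l with
  | nil => simp [bestC]
  | cons d r ih =>
    simp only [List.map_cons, bestC, ih]
    rcases bestC r with _ | m
    · rfl
    · simp only [Option.map_some]
      try dsimp only
      split_ifs <;> first | rfl | (exfalso; omega)

theorem shift_scan (l : List (Int × List Int × List (List Int))) (c : Int) (np : List Int)
    (ans : Int) (fin : List (List Int)) (hc : 1 ≤ c) (ha : ans ≤ 1234567890) :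
    (l.map (fun d => (c + d.1, d.2.1, np :: d.2.2))).foldl cmpStep (ans, fin) =
      (let r := l.foldl cmpStep ((1234567890 : Int), []);
       if r.1 + c < ans then (r.1 + c, np :: r.2) else (ans, fin)) := by
  rw [foldl_cmp_best, best_shift, foldl_cmp_best]
  rcases bestC l with _ | m
  · simp only [Option.map_none]
    try dsimp only
    rw [if_neg (by omega)]
  · simp only [Option.map_some]
    try dsimp only
    by_cases hm : m.1 < 1234567890
    · rw [if_pos hm]
      split_ifs with h1 h2 h2 <;> first | (refine Prod.ext ?_ rfl; simp; omega) | rfl | (exfalso; omega)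
    · rw [if_neg hm, if_neg (by omega), if_neg (by omega)]
theorem mtfA_go_eq (p : List Int) (e : Int) :
    ∀ (m k : Nat), k + m = p.length →
    mtfA_go p e (List.range' k m) =
      (match PySem.List.index? (p.drop k) e with
       | none => none
       | some j => some (mvStep p e (k + j), ((k + j : Nat) : Int) + 1)) := by
  intro m
  induction m with
  | zero =>
    intro k hk
    have : p.drop k = [] := List.drop_eq_nil_of_le (by omega)
    simp [mtfA_go, this, PySem.List.index?]
  | succ m ih =>
    intro k hk
    have hklt : k < p.length := by omega
    have hdk : p.drop k = p[k] :: p.drop (k + 1) := (List.getElem_cons_drop hklt).symm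
    rw [List.range'_succ]
    simp only [mtfA_go, PySem.List.pyGet?_natCast, List.getElem?_eq_getElem hklt,
      Option.getD_some]
    by_cases h : p[k] = e
    · rw [if_pos h, hdk, h, PySem.List.index?_cons_self]
      have h1 : PySem.List.slice p none (some ((k : Nat) : Int)) = p.take k :=
        PySem.List.slice_to_natCast _ _
      have h2 : PySem.List.slice p (some (((k : Nat) : Int) + 1)) none = p.drop (k + 1) := by
        rw [show (((k : Nat) : Int) + 1) = (((k + 1 : Nat)) : Int) by push_cast; ring]
        exact PySem.List.slice_from_natCast _ _
      rw [h1, h2]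
      simp [mvStep]
    · rw [if_neg h, ih (k + 1) (by omega), hdk,
        PySem.List.index?_cons_of_ne _ (fun he => h he)]
      rcases PySem.List.index? (p.drop (k + 1)) e with _ | j
      · rfl
      · simp only [Option.map_some]
        have : k + (j + 1) = (k + 1) + j := by omega
        rw [this]

theorem mtf_eq (p : List Int) (e : Int) :
    mtf p e =
      (match PySem.List.index? p e with
       | none => none
       | some j => some (mvStep p e j, ((j : Nat) : Int) + 1)) := by
  rw [mtf, List.range_eq_range', mtfA_go_eq p e p.length 0 (by omega)]
  simp

theorem mem_mvStep (p : List Int) (e : Int) (j : Nat)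
    (h : PySem.List.index? p e = some j) (x : Int) : x ∈ mvStep p e j ↔ x ∈ p := by
  rw [PySem.List.index?_eq_some_iff] at h
  obtain ⟨pre, suf, hp, hlen, -⟩ := h
  subst hp
  have ht : (pre ++ e :: suf).take j = pre := by
    rw [← hlen, List.take_left]
  have hd : (pre ++ e :: suf).drop (j + 1) = suf := by
    rw [show pre ++ e :: suf = (pre ++ [e]) ++ suf by simp]
    rw [List.drop_left' (by simp [hlen])]
  rw [mvStep, ht, hd]
  simp [List.mem_append, List.mem_cons]
  tauto
theorem pre_parts (p : List Int) (s : List Int) (rest : List (List Int))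
    (hpre : Pre_solve p (s :: rest)) (hs : s ≠ []) :
    (∀ x ∈ s, x ∈ p) ∧
      (∀ (np : List Int), (∀ x, x ∈ np ↔ x ∈ p) → Pre_solve np rest) := by
  unfold Pre_solve at hpre ⊢
  rw [List.takeWhile_cons, if_pos (by simpa using hs)] at hpre
  constructor
  · exact fun x hx => hpre s (List.mem_cons_self) x hx
  · intro np hnp s' hs' x hx
    rw [hnp]
    exact hpre s' (List.mem_cons_of_mem _ hs') x hx

def groupOf (p : List Int) (rest : List (List Int)) (e : Int) :
    List (Int × List Int × List (List Int)) :=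
  (expandT (mvStep p e ((PySem.List.index? p e).getD 0)) rest).map
    (fun d => ((((PySem.List.index? p e).getD 0 : Nat) : Int) + 1 + d.1, d.2.1,
               mvStep p e ((PySem.List.index? p e).getD 0) :: d.2.2))

theorem loopA_eq (p : List Int) (rest : List (List Int))
    (IH : ∀ np, Pre_solve np rest → solve np rest =
      (let r := (expandT np rest).foldl cmpStep ((1234567890 : Int), []); (r.1, np :: r.2))) :
    ∀ (s : List Int) (ans : Int) (fin : List (List Int)),
    (∀ e ∈ s, e ∈ p) →
    (∀ e ∈ s, Pre_solve (mvStep p e ((PySem.List.index? p e).getD 0)) rest) →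
    ans ≤ 1234567890 →
    solveA_loop p rest s ans fin = (s.flatMap (groupOf p rest)).foldl cmpStep (ans, fin) := by
  intro s
  induction s with
  | nil => intro ans fin _ _ _; simp [solveA_loop]
  | cons e s' ihs =>
    intro ans fin hmem hprestep hans
    have he : e ∈ p := hmem e List.mem_cons_self
    obtain ⟨j, hj⟩ : ∃ j, PySem.List.index? p e = some j := by
      have := (PySem.List.index?_isSome_iff (xs := p) (v := e)).2 he
      exact Option.isSome_iff_exists.1 this
    have hjd : (PySem.List.index? p e).getD 0 = j := by rw [hj]; rfl
    have hrec := IH (mvStep p e j) (by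
      have := hprestep e List.mem_cons_self
      rwa [hjd] at this)
    rw [solveA_loop, mtf_eq, hj]
    simp only []
    rw [hrec]
    simp only [List.flatMap_cons, List.foldl_append]
    have hgrp : (groupOf p rest e).foldl cmpStep (ans, fin) =
        (let r := (expandT (mvStep p e j) rest).foldl cmpStep ((1234567890 : Int), []);
         if r.1 + ((j : Nat) : Int) + 1 < ans
         then (r.1 + ((j : Nat) : Int) + 1, mvStep p e j :: r.2) else (ans, fin)) := by
      rw [groupOf, hjd]
      have := shift_scan (expandT (mvStep p e j) rest) (((j : Nat) : Int) + 1) (mvStep p e j)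
        ans fin (by omega) hans
      rw [show (fun (d : Int × List Int × List (List Int)) =>
            (((j : Nat) : Int) + 1 + d.1, d.2.1, mvStep p e j :: d.2.2)) =
          (fun d => ((((j : Nat) : Int) + 1) + d.1, d.2.1, mvStep p e j :: d.2.2)) from rfl]
      rw [this]
      simp only []
      rw [show ∀ r : Int, r + (((j : Nat) : Int) + 1) = r + ((j : Nat) : Int) + 1 from
        fun r => by ring]
    rw [hgrp]
    simp only []
    have hmem' : ∀ e ∈ s', e ∈ p := fun e h => hmem e (List.mem_cons_of_mem _ h)
    have hpre' : ∀ e ∈ s', Pre_solve (mvStep p e ((PySem.List.index? p e).getD 0)) rest :=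
      fun e h => hprestep e (List.mem_cons_of_mem _ h)
    set r := (expandT (mvStep p e j) rest).foldl cmpStep ((1234567890 : Int), []) with hr
    by_cases hc : r.1 + (((j : Nat) : Int) + 1) < ans
    · rw [if_pos hc, if_pos (by omega), ihs _ _ hmem' hpre' (by omega)]
      rw [show r.1 + (((j : Nat) : Int) + 1) = r.1 + ((j : Nat) : Int) + 1 from by ring]
    · rw [if_neg hc, if_neg (by omega), ihs _ _ hmem' hpre' hans]
theorem solve_eq_expand' (sets : List (List Int)) :
    ∀ (p : List Int), Pre_solve p sets →
    solve p sets =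
      (let r := (expandT p sets).foldl cmpStep ((1234567890 : Int), []); (r.1, p :: r.2)) := by
  induction sets with
  | nil =>
    intro p _
    rw [solve]
    norm_num [expandT, cmpStep]
  | cons s rest ih =>
    intro p hpre
    by_cases hs : s = []
    · subst hs
      rw [solve]
      simp [solveA_loop, expandT]
    · obtain ⟨hmem, hnp⟩ := pre_parts p s rest hpre hs
      have hprestep : ∀ e ∈ s, Pre_solve (mvStep p e ((PySem.List.index? p e).getD 0)) rest := by
        intro e hes
        obtain ⟨j, hj⟩ : ∃ j, PySem.List.index? p e = some j :=
          Option.isSome_iff_exists.1 ((PySem.List.index?_isSome_iff p e).2 (hmem e hes))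
        rw [hj]
        exact hnp _ (fun x => by
          have := mem_mvStep p e j hj x
          simpa [hj] using this)
      rw [solve]
      rw [loopA_eq p rest ih s 1234567890 [] hmem hprestep (by omega)]
      rfl

theorem solve_eq_expand (p : List Int) (sets : List (List Int)) (h : Pre_solve p sets) :
    solve p sets =
      (let r := (expandT p sets).foldl cmpStep ((1234567890 : Int), []); (r.1, p :: r.2)) :=
  solve_eq_expand' sets p h

-- ===== VERDICT (by name: the statement is the Claim_ definition above) =====
theorem solve_spec : Claim_equal_solve := by
  intro p sets _ hpre
  unfold Spec_solve
  rw [solve_eq_expand p sets hpre, solve_alt_eq_expand']
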